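-- pv_equiv track=rewrite | github.com/lovechino/AItuvi | AIcore/core/core.py | hour_to_chi
-- ===== SOURCE A (Python) =====
-- def hour_to_chi(hour, minute=0):
--     """
--     Nhập giờ sinh dạng số + phút → trả về địa chi giờ
--     Quy ước Tử Vi: mỗi giờ chi = 2 tiếng
--     23:00–00:59 Tý, 01:00–02:59 Sửu, 03:00–04:59 Dần, ...
--     Phút KHÔNG làm đổi giờ chi
--     """
--     hour = hour % 24
--     # quy về mốc bắt đầu giờ chi
--     if hour == 23 or hour < 1:
--         return "Tý"
--     mapping = [
--         (1,3,"Sửu"),(3,5,"Dần"),(5,7,"Mão"),(7,9,"Thìn"),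
--         (9,11,"Tỵ"),(11,13,"Ngọ"),(13,15,"Mùi"),(15,17,"Thân"),
--         (17,19,"Dậu"),(19,21,"Tuất"),(21,23,"Hợi")
--     ]
--     for start, end, chi in mapping:
--         if start <= hour < end:
--             return chi
--     return "Tý"
-- ===== SOURCE B (Python) =====
-- _CHI = ["Tý", "Sửu", "Dần", "Mão", "Thìn", "Tỵ",
--         "Ngọ", "Mùi", "Thân", "Dậu", "Tuất", "Hợi"]
--
-- def hour_to_chi(hour, minute=0):
--     return _CHI[int(((hour % 24) + 1) // 2) % 12]
-- ===== Notes on version B (the rewrite author's own statement) =====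
-- stated objective: simpler
-- what changed: Replaces the special-case guard plus an 11-entry interval table scanned in a loop by a single closed-form index ((hour%24+1)//2)%12 into one ordered list of the 12 branch names.
import Mathlib
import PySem

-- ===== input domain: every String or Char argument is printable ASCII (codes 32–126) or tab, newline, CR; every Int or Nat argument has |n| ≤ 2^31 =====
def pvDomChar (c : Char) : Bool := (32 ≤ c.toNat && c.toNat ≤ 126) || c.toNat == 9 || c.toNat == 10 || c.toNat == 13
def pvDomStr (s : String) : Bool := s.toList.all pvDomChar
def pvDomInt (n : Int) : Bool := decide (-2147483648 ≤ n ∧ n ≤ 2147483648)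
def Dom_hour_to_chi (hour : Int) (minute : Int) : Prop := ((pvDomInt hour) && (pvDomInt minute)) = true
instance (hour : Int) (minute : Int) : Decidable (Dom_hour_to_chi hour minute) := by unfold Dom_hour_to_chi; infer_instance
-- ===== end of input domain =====

-- B replaces A's hour-23/<1 guard and interval-table scan by one closed-form index
-- ((hour%24+1)//2)%12 into an ordered list of the 12 branch names (objective: simpler).


-- ===== PORT A =====
-- the for-loop over the interval table: first matching interval wins, else "Tý"
def pvScanA (h : Int) : List (Int × Int × String) → String
  | [] => "Tý"
  | (s, e, chi) :: rest => if s ≤ h ∧ h < e then chi else pvScanA h rest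

def hour_to_chi (hour : Int) (minute : Int) : String :=
  let h := PySem.Int.mod hour 24
  if h == 23 || h < 1 then "Tý"
  else
    pvScanA h
      [(1,3,"Sửu"),(3,5,"Dần"),(5,7,"Mão"),(7,9,"Thìn"),
       (9,11,"Tỵ"),(11,13,"Ngọ"),(13,15,"Mùi"),(15,17,"Thân"),
       (17,19,"Dậu"),(19,21,"Tuất"),(21,23,"Hợi")]

-- ===== PORT B =====
def pvChiNames : List String :=
  ["Tý", "Sửu", "Dần", "Mão", "Thìn", "Tỵ", "Ngọ", "Mùi", "Thân", "Dậu", "Tuất", "Hợi"]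

def hour_to_chi_alt (hour : Int) (minute : Int) : String :=
  (PySem.List.pyGet? pvChiNames
    (PySem.Int.mod (PySem.Int.floordiv (PySem.Int.mod hour 24 + 1) 2) 12)).getD ""

-- ===== PRECONDITION & SPEC =====
def Spec_hour_to_chi (hour : Int) (minute : Int) (out : String) : Prop := out = hour_to_chi_alt hour minute
instance (hour : Int) (minute : Int) (out : String) : Decidable (Spec_hour_to_chi hour minute out) := by unfold Spec_hour_to_chi; infer_instance

-- ===== CLAIM (what is proved, stated in full; the proofs are below) =====
def Claim_equal_hour_to_chi : Prop := ∀ (hour : Int) (minute : Int), Dom_hour_to_chi hour minute → Spec_hour_to_chi hour minute (hour_to_chi hour minute)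

-- ===== LEMMAS AND PROOFS =====
-- both ports depend on hour only through r = hour % 24; check the 24 residues
theorem hour_to_chi_key (r : Int) (h0 : 0 ≤ r) (h1 : r < 24) (hour minute : Int)
    (hr : PySem.Int.mod hour 24 = r) :
    hour_to_chi hour minute = hour_to_chi_alt hour minute := by
  unfold hour_to_chi hour_to_chi_alt
  rw [hr]
  interval_cases r <;> decide

-- ===== VERDICT (by name: the statement is the Claim_ definition above) =====
theorem hour_to_chi_spec : Claim_equal_hour_to_chi := by
  intro hour minute _
  have hpos : (0:Int) < 24 := by norm_num
  have hm : PySem.Int.mod hour 24 = hour % 24 := PySem.Int.mod_eq_emod_of_pos hpos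
  exact hour_to_chi_key (hour % 24) (Int.emod_nonneg _ (by norm_num)) (Int.emod_lt_of_pos _ hpos) hour minute hm
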